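-- pv_equiv track=rewrite | github.com/m-amirpour/graphic-sequence | src/graph_algorithm.py | erdos_gallai_check
-- ===== SOURCE A (Python) =====
-- from typing import List, Set, Dict, Tuple
--
-- def erdos_gallai_check(sequence: List[int]) -> bool:
--     """
--     Implements the Erdős-Gallai theorem to check if a sequence is graphic.
--
--     The Erdős-Gallai theorem states that a sequence of non-negative integers
--     d1 ≥ d2 ≥ ... ≥ dn is graphic if and only if its sum is even and
--
--     sum(di) <= k(k-1) + sum(min(di,k)) for all k in [1,n]
--                                       i=k+1
--
--     Args:
--         sequence (List[int]): A sequence of non-negative integers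
--
--     Returns:
--         bool: True if the sequence is graphic, False otherwise
--     """
--     if not sequence:
--         return True
--
--     # Make a copy and sort in descending order
--     seq = sorted(sequence, reverse=True)
--     n = len(seq)
--
--     # Check if sum is even
--     if sum(seq) % 2 != 0:
--         return False
--
--     # Check Erdős-Gallai conditions
--     for k in range(1, n + 1):
--         left_sum = sum(seq[:k])
--         right_sum = k * (k - 1)
--         right_sum += sum(min(seq[i], k) for i in range(k, n))
--
--         if left_sum > right_sum:
--             return False
--
--     return True
-- ===== SOURCE B (Python) =====
-- from typing import List
--
-- def erdos_gallai_check(sequence: List[int]) -> bool: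
--     if not sequence:
--         return True
--     seq = sorted(sequence, reverse=True)
--     n = len(seq)
--     if sum(seq) % 2 != 0:
--         return False
--     # prefix sums: prefix[j] = sum of the j largest degrees
--     prefix = [0]
--     for x in seq:
--         prefix.append(prefix[-1] + x)
--     for k in range(1, n + 1):
--         # binary search: first index t in [k, n) with seq[t] < k (seq is descending)
--         lo, hi = k, n
--         while lo < hi:
--             mid = (lo + hi) // 2
--             if seq[mid] >= k:
--                 lo = mid + 1
--             else:
--                 hi = mid
--         t = lo
--         right = k * (k - 1) + k * (t - k) + (prefix[n] - prefix[t])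
--         if prefix[k] > right:
--             return False
--     return True
-- ===== Notes on version B (the rewrite author's own statement) =====
-- stated objective: alternative
-- what changed: Replaces A's per-k rescans (sum(seq[:k]) and a min-sum over the whole tail) by a prefix-sum array built once plus a binary search for the split point where the sorted degrees drop below k, so each Erdos-Gallai inequality is evaluated from three prefix-sum lookups instead of two O(n) passes.
import Mathlib
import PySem

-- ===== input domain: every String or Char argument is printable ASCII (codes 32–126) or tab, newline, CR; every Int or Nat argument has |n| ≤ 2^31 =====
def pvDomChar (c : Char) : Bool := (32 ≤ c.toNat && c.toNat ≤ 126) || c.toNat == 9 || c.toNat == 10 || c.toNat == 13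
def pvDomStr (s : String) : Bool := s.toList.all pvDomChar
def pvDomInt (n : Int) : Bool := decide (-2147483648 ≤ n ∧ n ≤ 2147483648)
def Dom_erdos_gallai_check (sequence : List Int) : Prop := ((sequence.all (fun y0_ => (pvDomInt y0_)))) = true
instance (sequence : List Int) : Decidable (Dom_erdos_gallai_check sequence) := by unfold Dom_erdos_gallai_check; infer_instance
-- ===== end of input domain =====

-- B replaces A's per-k rescans by a prefix-sum array built once and a binary search
-- for the split point where the sorted degrees drop below k (objective: alternative).

-- ===== PORT A =====
-- loop 'for k in range(1, n+1): … if left_sum > right_sum: return False'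
def egLoopA (seq : List Int) (n : Int) (ks : List Int) : Bool :=
  match ks with
  | [] => true
  | k :: rest =>
    let left_sum := (PySem.List.slice seq none (some k)).sum
    let right_sum := k * (k - 1) +
      ((PySem.List.pyRange k n 1).map (fun i => min (PySem.List.pyGetD seq i 0) k)).sum
    if left_sum > right_sum then false else egLoopA seq n rest

def erdos_gallai_check (sequence : List Int) : Bool :=
  if sequence = [] then true
  else
    let seq := PySem.List.sorted sequence (fun x => x) true
    let n : Int := PySem.List.len seq
    if PySem.Int.mod seq.sum 2 ≠ 0 then false
    else egLoopA seq n (PySem.List.pyRange 1 (n + 1) 1)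

-- ===== PORT B =====
-- 'while lo < hi: mid = (lo+hi)//2; …' — first index t in [lo,hi) with seq[t] < k
def egBsearch (seq : List Int) (k : Int) (lo hi : Int) : Int :=
  if h : lo < hi then
    let mid := PySem.Int.floordiv (lo + hi) 2
    if k ≤ PySem.List.pyGetD seq mid 0 then egBsearch seq k (mid + 1) hi
    else egBsearch seq k lo mid
  else lo
termination_by (hi - lo).toNat
decreasing_by
  · have := PySem.Int.floordiv_two_mid_bounds (le_of_lt h)
    have hlt : PySem.Int.floordiv (lo + hi) 2 < hi := by
      rw [PySem.Int.floordiv_lt_iff_lt_mul (by omega)]; omega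
    omega
  · have := PySem.Int.floordiv_two_mid_bounds (le_of_lt h)
    have hlt : PySem.Int.floordiv (lo + hi) 2 < hi := by
      rw [PySem.Int.floordiv_lt_iff_lt_mul (by omega)]; omega
    omega

-- 'prefix = [0]; for x in seq: prefix.append(prefix[-1] + x)'
def egPrefix (seq : List Int) : List Int :=
  seq.foldl (fun P x => P ++ [PySem.List.pyGetD P (-1) 0 + x]) [0]

def egLoopB (seq P : List Int) (n : Int) (ks : List Int) : Bool :=
  match ks with
  | [] => true
  | k :: rest =>
    let t := egBsearch seq k k n
    let right := k * (k - 1) + k * (t - k) +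
      (PySem.List.pyGetD P n 0 - PySem.List.pyGetD P t 0)
    if PySem.List.pyGetD P k 0 > right then false else egLoopB seq P n rest

def erdos_gallai_check_alt (sequence : List Int) : Bool :=
  if sequence = [] then true
  else
    let seq := PySem.List.sorted sequence (fun x => x) true
    let n : Int := PySem.List.len seq
    if PySem.Int.mod seq.sum 2 ≠ 0 then false
    else egLoopB seq (egPrefix seq) n (PySem.List.pyRange 1 (n + 1) 1)

-- ===== PRECONDITION & SPEC =====
def Spec_erdos_gallai_check (sequence : List Int) (out : Bool) : Prop := out = erdos_gallai_check_alt sequence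
instance (sequence : List Int) (out : Bool) : Decidable (Spec_erdos_gallai_check sequence out) := by unfold Spec_erdos_gallai_check; infer_instance

-- ===== CLAIM (what is proved, stated in full; the proofs are below) =====
def Claim_equal_erdos_gallai_check : Prop := ∀ (sequence : List Int), Dom_erdos_gallai_check sequence → Spec_erdos_gallai_check sequence (erdos_gallai_check sequence)

-- ===== LEMMAS AND PROOFS =====

-- running sums continuing from s
def egScan (s : Int) (xs : List Int) : List Int :=
  match xs with
  | [] => []
  | x :: xs => (s + x) :: egScan (s + x) xs

lemma egPrefix_foldl (xs : List Int) (P : List Int) (s : Int)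
    (hlast : ∀ d, PySem.List.pyGetD P (-1) d = s) :
    xs.foldl (fun P x => P ++ [PySem.List.pyGetD P (-1) 0 + x]) P = P ++ egScan s xs := by
  induction xs generalizing P s with
  | nil => simp [egScan]
  | cons x xs ih =>
    simp only [List.foldl_cons, egScan, hlast 0]
    rw [ih (P ++ [s + x]) (s + x)
      (fun d => PySem.List.pyGetD_neg_one_append_singleton P (s + x) d)]
    simp

lemma egPrefix_eq (seq : List Int) : egPrefix seq = 0 :: egScan 0 seq := by
  have := egPrefix_foldl seq [0] 0 (fun d => rfl)
  simpa [egPrefix] using this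

lemma egScan_getD (xs : List Int) (s : Int) (j : Nat) (hj : j < xs.length) :
    (egScan s xs).getD j 0 = s + (xs.take (j + 1)).sum := by
  induction xs generalizing s j with
  | nil => simp at hj
  | cons x xs ih =>
    cases j with
    | zero => simp [egScan]
    | succ j =>
      simp only [egScan, List.getD_cons_succ, List.take_succ_cons, List.sum_cons]
      rw [ih (s + x) j (by simpa using hj)]
      ring

-- prefix[j] = sum of the first j elements, for 0 ≤ j ≤ n
lemma egPrefix_getD (seq : List Int) (j : Nat) (hj : j ≤ seq.length) :
    (egPrefix seq).getD j 0 = (seq.take j).sum := by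
  rw [egPrefix_eq]
  cases j with
  | zero => simp
  | succ j =>
    simp only [List.getD_cons_succ]
    rw [egScan_getD seq 0 j (by omega)]
    simp

-- index characterisation of countP on a descending list
lemma eg_sorted_count (k : Int) (xs : List Int) (h : xs.Pairwise (fun a b => b ≤ a))
    (j : Nat) (hj : j < xs.length) :
    (k ≤ xs.getD j 0 ↔ j < xs.countP (fun x => decide (k ≤ x))) := by
  induction xs generalizing j with
  | nil => simp at hj
  | cons x xs ih =>
    have hall : ∀ y ∈ xs, y ≤ x := (List.pairwise_cons.1 h).1
    have hp : xs.Pairwise (fun a b => b ≤ a) := (List.pairwise_cons.1 h).2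
    by_cases hx : k ≤ x
    · have hc : (x :: xs).countP (fun x => decide (k ≤ x)) =
          xs.countP (fun x => decide (k ≤ x)) + 1 := by
        simp [hx]
      cases j with
      | zero => simp [hc, hx]
      | succ j =>
        simp only [List.getD_cons_succ, hc]
        rw [ih hp j (by simpa using hj)]
        omega
    · have hc0 : xs.countP (fun x => decide (k ≤ x)) = 0 := by
        rw [List.countP_eq_zero]
        intro y hy
        simp only [decide_eq_true_eq]
        have := hall y hy
        omega
      have hc : (x :: xs).countP (fun x => decide (k ≤ x)) = 0 := by
        simp [hx, hc0]
      rw [hc]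
      cases j with
      | zero => simpa using hx
      | succ j =>
        simp only [List.getD_cons_succ]
        have hjl : j < xs.length := by simpa using hj
        have : xs.getD j 0 ∈ xs := by
          rw [List.getD_eq_getElem _ _ hjl]; exact List.getElem_mem hjl
        have := hall _ this
        constructor
        · intro hk; omega
        · omega

-- sum of min(·,k) over a descending list, split at the count
lemma eg_min_sum (k : Int) (xs : List Int) (h : xs.Pairwise (fun a b => b ≤ a)) :
    (xs.map (fun x => min x k)).sum =
      k * (xs.countP (fun x => decide (k ≤ x)) : Int) +
        (xs.drop (xs.countP (fun x => decide (k ≤ x)))).sum := by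
  induction xs with
  | nil => simp
  | cons x xs ih =>
    have hall : ∀ y ∈ xs, y ≤ x := (List.pairwise_cons.1 h).1
    have hp : xs.Pairwise (fun a b => b ≤ a) := (List.pairwise_cons.1 h).2
    by_cases hx : k ≤ x
    · have hc : (x :: xs).countP (fun x => decide (k ≤ x)) =
          xs.countP (fun x => decide (k ≤ x)) + 1 := by
        simp [hx]
      have hmin : min x k = k := by omega
      simp only [List.map_cons, List.sum_cons, hc, hmin, List.drop_succ_cons]
      rw [ih hp]
      push_cast
      ring
    · have hc0 : xs.countP (fun x => decide (k ≤ x)) = 0 := by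
        rw [List.countP_eq_zero]
        intro y hy
        simp only [decide_eq_true_eq]
        have := hall y hy
        omega
      have hc : (x :: xs).countP (fun x => decide (k ≤ x)) = 0 := by
        simp [hx, hc0]
      have hmin : min x k = x := by omega
      simp only [List.map_cons, List.sum_cons, hc, hmin, List.drop_zero]
      rw [ih hp, hc0]
      simp

-- binary-search correctness against a split point t
lemma egBsearch_correct (seq : List Int) (k t : Int) :
    ∀ lo hi, lo ≤ hi → lo ≤ t → t ≤ hi →
      (∀ i : Int, lo ≤ i → i < hi → (k ≤ PySem.List.pyGetD seq i 0 ↔ i < t)) →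
      egBsearch seq k lo hi = t := by
  intro lo hi
  induction hfuel : (hi - lo).toNat using Nat.strong_induction_on generalizing lo hi with
  | _ fuel ih =>
    intro hlohi hlot hthi hchar
    rw [egBsearch]
    by_cases h : lo < hi
    · simp only [h, dif_pos]
      have hmid := PySem.Int.floordiv_two_mid_bounds (le_of_lt h)
      have hmlt : PySem.Int.floordiv (lo + hi) 2 < hi := by
        rw [PySem.Int.floordiv_lt_iff_lt_mul (by omega)]; omega
      set mid := PySem.Int.floordiv (lo + hi) 2 with hmiddef
      by_cases hge : k ≤ PySem.List.pyGetD seq mid 0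
      · have hmidt : mid < t := (hchar mid (by omega) hmlt).1 hge
        simp only [hge, if_pos]
        exact ih (hi - (mid + 1)).toNat (by omega) (mid + 1) hi rfl (by omega) (by omega)
          (by omega) (fun i h1 h2 => hchar i (by omega) h2)
      · have htmid : t ≤ mid := by
          by_contra hcon
          exact hge ((hchar mid (by omega) hmlt).2 (by omega))
        simp only [hge, if_neg, not_false_iff]
        exact ih (mid - lo).toNat (by omega) lo mid rfl (by omega) (by omega) (by omega)
          (fun i h1 h2 => hchar i h1 (by omega))
    · simp only [h, dif_neg, not_false_iff]
      omega

-- sum over a suffix, as total minus prefix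
lemma eg_sum_drop (xs : List Int) (m : Nat) :
    (xs.drop m).sum = xs.sum - (xs.take m).sum := by
  have := List.sum_take_add_sum_drop xs m
  omega

-- the per-k bodies of the two loops agree on a descending list
lemma eg_body (seq : List Int) (h : seq.Pairwise (fun a b => b ≤ a)) (k : Int)
    (hk1 : 1 ≤ k) (hkn : k ≤ (seq.length : Int)) :
    ((PySem.List.slice seq none (some k)).sum =
        PySem.List.pyGetD (egPrefix seq) k 0) ∧
      (k * (k - 1) +
          ((PySem.List.pyRange k (PySem.List.len seq) 1).map
            (fun i => min (PySem.List.pyGetD seq i 0) k)).sum =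
        k * (k - 1) + k * (egBsearch seq k k (PySem.List.len seq) - k) +
          (PySem.List.pyGetD (egPrefix seq) (PySem.List.len seq) 0 -
            PySem.List.pyGetD (egPrefix seq) (egBsearch seq k k (PySem.List.len seq)) 0)) := by
  have hk0 : (0 : Int) ≤ k := by omega
  set kn := k.toNat with hkn_def
  have hkk : (kn : Int) = k := Int.toNat_of_nonneg hk0
  have hknlen : kn ≤ seq.length := by omega
  set tail := seq.drop kn with htail
  set c := tail.countP (fun x => decide (k ≤ x)) with hc
  have hclen : c ≤ tail.length := List.countP_le_length
  have htlen : tail.length = seq.length - kn := by simp [htail]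
  -- getD on seq at index kn + j is getD on tail at j
  have hgetdrop : ∀ j : Nat, j < tail.length → seq.getD (kn + j) 0 = tail.getD j 0 := by
    intro j hj
    rw [List.getD_eq_getElem _ _ hj, List.getD_eq_getElem _ _ (by simp [htail] at hj ⊢; omega)]
    simp [htail]
  -- binary search returns k + c
  have hbs : egBsearch seq k k (PySem.List.len seq) = k + (c : Int) := by
    rw [PySem.List.len_eq]
    apply egBsearch_correct seq k (k + (c : Int)) k (seq.length : Int) hkn (by omega)
      (by omega)
    intro i h1 h2
    have hi0 : (0 : Int) ≤ i := by omega
    have hj : i = (kn : Int) + ((i.toNat - kn : Nat) : Int) := by omega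
    set j := i.toNat - kn with hjdef
    have hjt : j < tail.length := by omega
    rw [hj, show ((kn : Int) + (j : Int)) = ((kn + j : Nat) : Int) by push_cast; ring,
      PySem.List.pyGetD_natCast, hgetdrop j hjt,
      eg_sorted_count k tail (h.drop) j hjt]
    omega
  constructor
  · -- left sums
    rw [PySem.List.slice_to seq hk0, ← hkk, PySem.List.pyGetD_natCast,
      egPrefix_getD seq kn hknlen, Int.toNat_natCast]
  · -- right sums
    rw [hbs]
    have hmap : (PySem.List.pyRange k (PySem.List.len seq) 1).map
        (fun i => min (PySem.List.pyGetD seq i 0) k) =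
        (tail.map (fun x => min x k)) := by
      have : (fun i => min (PySem.List.pyGetD seq i 0) k) =
          (fun x => min x k) ∘ (fun i => PySem.List.pyGetD seq i 0) := rfl
      rw [this, ← List.map_map, PySem.List.map_pyGetD_pyRange seq 0 hk0, htail]
    rw [hmap, eg_min_sum k tail (h.drop), ← hc]
    have hP : ∀ (m : Nat), m ≤ seq.length →
        PySem.List.pyGetD (egPrefix seq) (m : Int) 0 = (seq.take m).sum := by
      intro m hm; rw [PySem.List.pyGetD_natCast, egPrefix_getD seq m hm]
    have hPn : PySem.List.pyGetD (egPrefix seq) (PySem.List.len seq) 0 = seq.sum := by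
      rw [PySem.List.len_eq, hP seq.length le_rfl, List.take_length]
    have ht : k + (c : Int) = ((kn + c : Nat) : Int) := by push_cast; omega
    rw [hPn, ht, hP (kn + c) (by omega)]
    have hdd : tail.drop c = seq.drop (kn + c) := by
      rw [htail, List.drop_drop]
    rw [hdd, eg_sum_drop seq (kn + c)]
    push_cast
    rw [hkk]
    ring

-- the two loops agree once their per-k bodies agree
lemma eg_loops (seq P : List Int) (n : Int) (ks : List Int)
    (hbody : ∀ k ∈ ks,
      ((PySem.List.slice seq none (some k)).sum = PySem.List.pyGetD P k 0) ∧
        (k * (k - 1) +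
            ((PySem.List.pyRange k n 1).map (fun i => min (PySem.List.pyGetD seq i 0) k)).sum =
          k * (k - 1) + k * (egBsearch seq k k n - k) +
            (PySem.List.pyGetD P n 0 - PySem.List.pyGetD P (egBsearch seq k k n) 0))) :
    egLoopA seq n ks = egLoopB seq P n ks := by
  induction ks with
  | nil => rfl
  | cons k rest ih =>
    obtain ⟨h1, h2⟩ := hbody k (List.mem_cons_self ..)
    simp only [egLoopA, egLoopB, h1, h2]
    split
    · rfl
    · exact ih (fun k hk => hbody k (List.mem_cons_of_mem _ hk))

-- ===== VERDICT (by name: the statement is the Claim_ definition above) =====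
theorem erdos_gallai_check_spec : Claim_equal_erdos_gallai_check := by
  intro sequence _
  unfold Spec_erdos_gallai_check erdos_gallai_check erdos_gallai_check_alt
  by_cases hnil : sequence = []
  · simp [hnil]
  · simp only [hnil, if_neg, not_false_iff]
    set seq := PySem.List.sorted sequence (fun x => x) true with hseq
    have hsorted : seq.Pairwise (fun a b => b ≤ a) := by
      simpa using PySem.List.sorted_pairwise_rev sequence (fun x => x)
    split
    · rfl
    · apply eg_loops
      intro k hk
      rw [PySem.List.len_eq] at hk ⊢
      rw [PySem.List.mem_pyRange_one] at hk
      have := eg_body seq hsorted k hk.1 (by omega)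
      rw [PySem.List.len_eq] at this
      exact this
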